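-- pv_equiv track=rewrite | github.com/preranajadhav15/Bluepineapple | Python/11.py | remove_first_last
-- ===== SOURCE A (Python) =====
-- def remove_first_last(string,ch):
--     result=""
--     count=0
--
--     for i in string:
--         if i==ch:
--             count+=1
--
--             if count==1 or count==string.count(ch):
--                 continue
--
--         result+=i
--     return result
-- ===== SOURCE B (Python) =====
-- def remove_first_last(string, ch):
--     idx = [i for i, c in enumerate(string) if c == ch]
--     if not idx:
--         return string
--     first, last = idx[0], idx[-1]
--     return ''.join(c for i, c in enumerate(string) if i != first and i != last)
-- ===== Notes on version B (the rewrite author's own statement) =====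
-- stated objective: alternative
-- what changed: A single running-count scan that re-counts ch and drops occurrences numbered 1 and count(ch) is replaced by building an index table of matching positions in one pass and filtering out positions idx[0] and idx[-1] in a second pass.
import Mathlib
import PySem

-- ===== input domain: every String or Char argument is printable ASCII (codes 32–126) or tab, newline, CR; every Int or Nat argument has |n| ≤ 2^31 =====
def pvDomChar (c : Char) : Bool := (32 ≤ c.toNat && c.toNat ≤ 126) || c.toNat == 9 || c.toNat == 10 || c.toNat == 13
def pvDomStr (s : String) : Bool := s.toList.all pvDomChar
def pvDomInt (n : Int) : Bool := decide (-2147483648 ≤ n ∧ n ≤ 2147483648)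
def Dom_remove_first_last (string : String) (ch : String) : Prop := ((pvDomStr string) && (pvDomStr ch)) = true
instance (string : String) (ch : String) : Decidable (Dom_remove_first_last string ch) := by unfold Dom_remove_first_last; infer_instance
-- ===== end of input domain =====

-- B replaces A's running-count scan (which re-counts ch at every match) by an index table of
-- matching positions built in one pass, then a positional filter; same return value, alternative shape.


-- ===== PORT A =====
-- one loop step of A: on a matching char increment count and skip the char when
-- count == 1 or count == string.count(ch); otherwise append it to result
def aStep (string : String) (ch : String) (st : List Char × Nat) (i : Char) : List Char × Nat :=
  if String.ofList [i] == ch then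
    if st.2 + 1 = 1 ∨ st.2 + 1 = PySem.Str.count string ch then (st.1, st.2 + 1)
    else (st.1 ++ [i], st.2 + 1)
  else (st.1 ++ [i], st.2)

def remove_first_last (string : String) (ch : String) : String :=
  String.ofList (string.toList.foldl (aStep string ch) ([], 0)).1

-- ===== PORT B =====
def remove_first_last_alt (string : String) (ch : String) : String :=
  let idx := ((PySem.List.enumerate string.toList 0).filter
      (fun p => String.ofList [p.2] == ch)).map Prod.fst
  if idx.isEmpty then string
  else
    let first := idx.headD 0
    let last := idx.getLastD 0
    String.ofList (((PySem.List.enumerate string.toList 0).filter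
        (fun p => !(p.1 == first) && !(p.1 == last))).map Prod.snd)

-- ===== PRECONDITION & SPEC =====
def Spec_remove_first_last (string : String) (ch : String) (out : String) : Prop := out = remove_first_last_alt string ch
instance (string : String) (ch : String) (out : String) : Decidable (Spec_remove_first_last string ch out) := by unfold Spec_remove_first_last; infer_instance

-- ===== CLAIM (what is proved, stated in full; the proofs are below) =====
def Claim_equal_remove_first_last : Prop := ∀ (string : String) (ch : String), Dom_remove_first_last string ch → Spec_remove_first_last string ch (remove_first_last string ch)

-- ===== LEMMAS AND PROOFS =====

-- Python's substring count on a single-character needle is List.count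
theorem go_singleton (c : Char) : ∀ (fuel : Nat) (l : List Char) (acc : Nat), l.length ≤ fuel →
    PySem.Chars.count.go [c] fuel l acc = acc + l.count c := by
  intro fuel
  induction fuel with
  | zero => intro l acc h; cases l with
    | nil => simp [PySem.Chars.count.go]
    | cons a t => simp at h
  | succ n ih =>
    intro l acc h
    cases l with
    | nil => simp [PySem.Chars.count.go]
    | cons a t =>
      simp only [PySem.Chars.count.go]
      by_cases hc : a = c
      · subst hc
        simp [List.isPrefixOf, ih t (acc + 1) (by simpa using h)]
        omega
      · simp [List.isPrefixOf, hc, ih t acc (by simpa using h), Ne.symm hc]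

theorem count_singleton (s : List Char) (c : Char) :
    PySem.Chars.count s [c] = s.count c := by
  simp [PySem.Chars.count, go_singleton c s.length s 0 le_rfl]

theorem str_beq_singleton (a c : Char) : (String.ofList [a] == String.ofList [c]) = (a == c) := by
  by_cases h : a = c
  · subst h; simp
  · have h2 : String.ofList [a] ≠ String.ofList [c] := fun e => h (by
      have := congrArg String.toList e; simpa using this)
    simp [h, h2]

-- pure recursion computing A's loop result (K stands for the constant string.count(ch))
def aRun (q : Char → Bool) (K : Nat) : List Char → Nat → List Char
  | [], _ => []
  | a :: t, cnt =>
    if q a then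
      if cnt + 1 = 1 ∨ cnt + 1 = K then aRun q K t (cnt + 1)
      else a :: aRun q K t (cnt + 1)
    else a :: aRun q K t cnt

theorem foldl_aStep (string ch : String) :
    ∀ (l : List Char) (res : List Char) (cnt : Nat),
      (l.foldl (aStep string ch) (res, cnt)).1
        = res ++ aRun (fun a => String.ofList [a] == ch) (PySem.Str.count string ch) l cnt := by
  intro l
  induction l with
  | nil => intro res cnt; simp [aRun]
  | cons a t ih =>
    intro res cnt
    rw [List.foldl_cons]
    by_cases hq : (String.ofList [a] == ch) = true
    · by_cases hc : cnt + 1 = 1 ∨ cnt + 1 = PySem.Str.count string ch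
      · rw [show aStep string ch (res, cnt) a = (res, cnt + 1) by unfold aStep; rw [if_pos hq, if_pos hc]]
        rw [ih]
        simp only [aRun]
        rw [if_pos hq, if_pos hc]
      · rw [show aStep string ch (res, cnt) a = (res ++ [a], cnt + 1) by unfold aStep; rw [if_pos hq, if_neg hc]]
        rw [ih]
        simp only [aRun]
        rw [if_pos hq, if_neg hc]
        simp
    · rw [show aStep string ch (res, cnt) a = (res ++ [a], cnt) by unfold aStep; rw [if_neg hq]]
      rw [ih]
      simp only [aRun]
      rw [if_neg hq]
      simp

theorem aRun_no_match (q : Char → Bool) (K : Nat) :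
    ∀ (l : List Char) (cnt : Nat), (∀ a ∈ l, q a = false) → aRun q K l cnt = l := by
  intro l
  induction l with
  | nil => intro cnt _; simp [aRun]
  | cons a t ih =>
    intro cnt h
    simp [aRun, h a (by simp), ih cnt (fun b hb => h b (by simp [hb]))]

theorem aRun_prefix (c : Char) (K : Nat) :
    ∀ (u w : List Char) (cnt : Nat), c ∉ u →
      aRun (fun a => a == c) K (u ++ w) cnt = u ++ aRun (fun a => a == c) K w cnt := by
  intro u
  induction u with
  | nil => intro w cnt _; simp
  | cons a t ih =>
    intro w cnt h
    have ha : a ≠ c := fun e => h (by simp [e])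
    simp [aRun, ha, ih w cnt (fun e => h (by simp [e]))]

-- remove the LAST occurrence of c (identity if c does not occur)
def dropLastOcc (c : Char) : List Char → List Char
  | [] => []
  | a :: t => if a = c ∧ c ∉ t then t else a :: dropLastOcc c t

theorem dropLastOcc_not_mem (c : Char) : ∀ (l : List Char), c ∉ l → dropLastOcc c l = l := by
  intro l
  induction l with
  | nil => intro _; rfl
  | cons a t ih =>
    intro h
    have ha : a ≠ c := fun e => h (by simp [e])
    simp [dropLastOcc, ha, ih (fun e => h (by simp [e]))]

theorem aRun_tail (c : Char) (K : Nat) :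
    ∀ (v : List Char) (cnt : Nat), 1 ≤ cnt → cnt + v.count c = K →
      aRun (fun a => a == c) K v cnt = dropLastOcc c v := by
  intro v
  induction v with
  | nil => intro cnt _ _; rfl
  | cons a t ih =>
    intro cnt h1 hK
    by_cases ha : a = c
    · subst ha
      by_cases ht : a ∈ t
      · have hKne : cnt + 1 ≠ K := by
          have : 1 ≤ t.count a := List.one_le_count_iff.mpr ht
          simp at hK; omega
        have hcond : ¬ (cnt + 1 = 1 ∨ cnt + 1 = K) := by
          rintro (h | h)
          · omega
          · exact hKne h
        simp only [aRun, beq_self_eq_true, if_true]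
        rw [if_neg hcond, ih (cnt + 1) (by omega) (by simp at hK ⊢; omega)]
        simp [dropLastOcc, ht]
      · have hKeq : cnt + 1 = K := by
          have : t.count a = 0 := List.count_eq_zero.mpr ht
          simp at hK; omega
        have hnm : ∀ b ∈ t, (b == a) = false := fun b hb => by
          simp only [beq_eq_false_iff_ne, ne_eq]; rintro rfl; exact ht hb
        simp only [aRun, beq_self_eq_true, if_true]
        rw [if_pos (Or.inr hKeq), aRun_no_match _ K t (cnt + 1) hnm]
        simp [dropLastOcc, ht]
    · have hb : (a == c) = false := by simp [ha]
      simp only [aRun, hb, Bool.false_eq_true, if_false]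
      rw [ih cnt h1 (by simp [ha] at hK ⊢; omega)]
      simp [dropLastOcc, ha]

theorem exists_first_split (c : Char) : ∀ (l : List Char), c ∈ l →
    ∃ u v, l = u ++ c :: v ∧ c ∉ u := by
  intro l
  induction l with
  | nil => intro h; simp at h
  | cons a t ih =>
    intro h
    by_cases ha : a = c
    · exact ⟨[], t, by simp [ha], by simp⟩
    · obtain ⟨u, v, h1, h2⟩ := ih (by
        rcases List.mem_cons.mp h with h | h
        · exact absurd h.symm ha
        · exact h)
      exact ⟨a :: u, v, by simp [h1], by simp [Ne.symm ha, h2]⟩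

-- positions of c in v, enumerating from s
def idxOf (c : Char) (s : Int) (v : List Char) : List Int :=
  ((PySem.List.enumerate v s).filter (fun p => p.2 == c)).map Prod.fst

theorem idxOf_cons (c : Char) (s : Int) (a : Char) (t : List Char) :
    idxOf c s (a :: t) = if a = c then s :: idxOf c (s + 1) t else idxOf c (s + 1) t := by
  by_cases h : a = c <;> simp [idxOf, PySem.List.enumerate_cons, h]

theorem idxOf_append (c : Char) : ∀ (u w : List Char) (s : Int),
    idxOf c s (u ++ w) = idxOf c s u ++ idxOf c (s + u.length) w := by
  intro u
  induction u with
  | nil => intro w s; simp [idxOf]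
  | cons a t ih =>
    intro w s
    rw [List.cons_append, idxOf_cons, idxOf_cons, ih w (s + 1)]
    by_cases h : a = c <;> simp [h] <;> ring_nf

theorem idxOf_ge (c : Char) : ∀ (v : List Char) (s : Int) (x : Int), x ∈ idxOf c s v → s ≤ x := by
  intro v
  induction v with
  | nil => intro s x h; simp [idxOf] at h
  | cons a t ih =>
    intro s x h
    rw [idxOf_cons] at h
    by_cases ha : a = c
    · simp only [ha, if_true, List.mem_cons] at h
      rcases h with rfl | h
      · exact le_refl x
      · linarith [ih (s + 1) x h]
    · simp only [ha, if_false] at h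
      linarith [ih (s + 1) x h]

theorem idxOf_nil_of_not_mem (c : Char) : ∀ (v : List Char) (s : Int), c ∉ v → idxOf c s v = [] := by
  intro v
  induction v with
  | nil => intro s _; rfl
  | cons a t ih =>
    intro s h
    rw [idxOf_cons]
    have ha : a ≠ c := fun e => h (by simp [e])
    simp [ha, ih (s + 1) (fun e => h (by simp [e]))]

theorem idxOf_ne_nil (c : Char) : ∀ (v : List Char) (s : Int), c ∈ v → idxOf c s v ≠ [] := by
  intro v
  induction v with
  | nil => intro s h; simp at h
  | cons a t ih =>
    intro s h
    rw [idxOf_cons]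
    by_cases ha : a = c
    · simp [ha]
    · have hct : c ∈ t := by
        rcases List.mem_cons.mp h with h | h
        · exact absurd h.symm ha
        · exact h
      simp only [ha, if_false]
      exact ih (s + 1) hct

theorem getLastD_mem {α : Type} (l : List α) (d : α) (h : l ≠ []) : l.getLastD d ∈ l := by
  obtain ⟨x, hx⟩ := List.getLast?_isSome.mpr h |> Option.isSome_iff_exists.mp
  rw [List.getLastD_eq_getLast?, hx]
  exact List.mem_of_getLast? hx

-- kernel of the B-side: filtering out the last matching position equals dropLastOcc
theorem filter_last (c : Char) :
    ∀ (v : List Char) (s : Int), c ∈ v →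
      ((PySem.List.enumerate v s).filter
          (fun p => !(p.1 == (idxOf c s v).getLastD 0))).map Prod.snd
        = dropLastOcc c v := by
  intro v
  induction v with
  | nil => intro s h; simp at h
  | cons a t ih =>
    intro s h
    rw [PySem.List.enumerate_cons, idxOf_cons]
    by_cases ha : a = c
    · by_cases ht : c ∈ t
      · -- last position lies in t, strictly beyond s
        have hne : idxOf c (s + 1) t ≠ [] := idxOf_ne_nil c t (s + 1) ht
        have hlast_mem : (s :: idxOf c (s + 1) t).getLastD 0 ∈ idxOf c (s + 1) t := by
          cases hx : idxOf c (s + 1) t with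
          | nil => exact absurd hx hne
          | cons y ys =>
            simpa using getLastD_mem (y :: ys) s (by simp)
        have hgt : s < (s :: idxOf c (s + 1) t).getLastD 0 := by
          have := idxOf_ge c t (s + 1) _ hlast_mem
          omega
        have hrw : (s :: idxOf c (s + 1) t).getLastD 0 = (idxOf c (s + 1) t).getLastD 0 := by
          cases hx : idxOf c (s + 1) t with
          | nil => exact absurd hx hne
          | cons y ys => simp
        simp only [ha, if_true, List.filter_cons, hrw]
        have hs : (!((s, c).1 == (idxOf c (s + 1) t).getLastD 0)) = true := by
          simp only [Bool.not_eq_eq_eq_not, Bool.not_true, beq_eq_false_iff_ne, ne_eq]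
          rw [hrw] at hgt
          omega
        rw [if_pos hs]
        simp only [List.map_cons]
        rw [ih (s + 1) ht]
        have hac : a = c := ha
        simp [dropLastOcc, ht]
      · -- this is the last occurrence
        have hnil : idxOf c (s + 1) t = [] := idxOf_nil_of_not_mem c t (s + 1) ht
        simp only [ha, if_true, hnil, List.getLastD_cons, List.getLastD_nil]
        rw [List.filter_cons]
        simp only [beq_self_eq_true, Bool.not_true, if_false, Bool.false_eq_true]
        have hall : ∀ p ∈ PySem.List.enumerate t (s + 1), (!(p.1 == s)) = true := by
          intro p hp
          obtain ⟨k, hk, rfl⟩ := (PySem.List.mem_enumerate_iff t (s + 1) p).mp hp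
          simp only [Bool.not_eq_eq_eq_not, Bool.not_true, beq_eq_false_iff_ne, ne_eq]
          omega
        rw [List.filter_eq_self.mpr hall, PySem.List.map_snd_enumerate]
        simp [dropLastOcc, ht]
    · -- head does not match: kept, recurse
      have hct : c ∈ t := by
        rcases List.mem_cons.mp h with h | h
        · exact absurd h.symm ha
        · exact h
      have hne : idxOf c (s + 1) t ≠ [] := idxOf_ne_nil c t (s + 1) hct
      have hmem : (idxOf c (s + 1) t).getLastD 0 ∈ idxOf c (s + 1) t := getLastD_mem _ _ hne
      have hgt : s < (idxOf c (s + 1) t).getLastD 0 := by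
        have := idxOf_ge c t (s + 1) _ hmem; omega
      simp only [ha, if_false, List.filter_cons]
      have hs : (!((s, a).1 == (idxOf c (s + 1) t).getLastD 0)) = true := by
        simp only [Bool.not_eq_eq_eq_not, Bool.not_true, beq_eq_false_iff_ne, ne_eq]
        omega
      rw [if_pos hs, List.map_cons, ih (s + 1) hct]
      simp [dropLastOcc, ha]

-- the matching-position list of B is idxOf once ch is known to be the single character c
theorem getLastD_cons_ne_nil {α : Type} (a d : α) (t : List α) (h : t ≠ []) :
    (a :: t).getLastD d = t.getLastD d := by
  cases t with
  | nil => exact absurd rfl h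
  | cons y ys => simp

theorem main_lists (c : Char) (l : List Char) (hcl : c ∈ l) :
    (l.foldl (aStep (String.ofList l) (String.ofList [c])) ([], 0)).1
      = ((PySem.List.enumerate l 0).filter
          (fun p => !(p.1 == (idxOf c 0 l).headD 0) && !(p.1 == (idxOf c 0 l).getLastD 0))).map
            Prod.snd := by
  have hfun2 : (fun a => String.ofList [a] == String.ofList [c]) = (fun a => a == c) :=
    funext fun a => str_beq_singleton a c
  have hK : PySem.Str.count (String.ofList l) (String.ofList [c]) = l.count c := by
    simp [PySem.Str.count, count_singleton]
  rw [foldl_aStep, hfun2, hK, List.nil_append]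
  obtain ⟨u, v, hl, hu⟩ := exists_first_split c l hcl
  subst hl
  have hc0 : u.count c = 0 := List.count_eq_zero.mpr hu
  -- A side collapses to u ++ dropLastOcc c v
  rw [aRun_prefix c _ u (c :: v) 0 hu]
  have hstep : aRun (fun a => a == c) ((u ++ c :: v).count c) (c :: v) 0
      = aRun (fun a => a == c) ((u ++ c :: v).count c) v 1 := by
    simp [aRun]
  rw [hstep, aRun_tail c _ v 1 le_rfl (by simp [List.count_append, hc0]; omega)]
  -- B side: the index list starts with n = u.length
  have hidxl : idxOf c 0 (u ++ c :: v)
      = (u.length : Int) :: idxOf c ((u.length : Int) + 1) v := by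
    rw [idxOf_append, idxOf_nil_of_not_mem c u 0 hu, List.nil_append, idxOf_cons]
    simp
  rw [hidxl]
  have hhead : (((u.length : Int) :: idxOf c ((u.length : Int) + 1) v).headD 0) = (u.length : Int) := rfl
  rw [hhead]
  have henum : PySem.List.enumerate (u ++ c :: v) 0
      = PySem.List.enumerate u 0 ++ ((u.length : Int), c) :: PySem.List.enumerate v ((u.length : Int) + 1) := by
    rw [PySem.List.enumerate_append, PySem.List.enumerate_cons]
    simp
  rw [henum, List.filter_append, List.map_append]
  -- the last matching position is at least u.length
  have hlast_ge : (u.length : Int) ≤ ((u.length : Int) :: idxOf c ((u.length : Int) + 1) v).getLastD 0 := by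
    cases hx : idxOf c ((u.length : Int) + 1) v with
    | nil => simp
    | cons y ys =>
      rw [getLastD_cons_ne_nil _ _ _ (by simp)]
      have hmem : (y :: ys).getLastD 0 ∈ y :: ys := getLastD_mem _ _ (by simp)
      have := idxOf_ge c v ((u.length : Int) + 1) _ (hx ▸ hmem)
      rw [hx] at this
      omega
  -- the u-block passes the filter untouched
  have hufilt : (PySem.List.enumerate u 0).filter
      (fun p => !(p.1 == (u.length : Int)) && !(p.1 == ((u.length : Int) :: idxOf c ((u.length : Int) + 1) v).getLastD 0))
      = PySem.List.enumerate u 0 := by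
    apply List.filter_eq_self.mpr
    intro p hp
    obtain ⟨k, hk, rfl⟩ := (PySem.List.mem_enumerate_iff u 0 p).mp hp
    simp only [Bool.and_eq_true, Bool.not_eq_eq_eq_not, Bool.not_true, beq_eq_false_iff_ne, ne_eq]
    constructor
    · omega
    · omega
  rw [hufilt, PySem.List.map_snd_enumerate]
  -- the first occurrence (position u.length) is dropped
  rw [List.filter_cons]
  rw [if_neg (by simp)]
  -- the v-block: drop the last occurrence
  congr 1
  by_cases hcv : c ∈ v
  · have hne : idxOf c ((u.length : Int) + 1) v ≠ [] := idxOf_ne_nil c v _ hcv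
    have hlast_eq : ((u.length : Int) :: idxOf c ((u.length : Int) + 1) v).getLastD 0
        = (idxOf c ((u.length : Int) + 1) v).getLastD 0 := getLastD_cons_ne_nil _ _ _ hne
    have hlast_gt : (u.length : Int) < (idxOf c ((u.length : Int) + 1) v).getLastD 0 := by
      have hmem := getLastD_mem _ (0 : Int) hne
      have := idxOf_ge c v ((u.length : Int) + 1) _ hmem
      omega
    rw [hlast_eq]
    have hcong : (PySem.List.enumerate v ((u.length : Int) + 1)).filter
        (fun p => !(p.1 == (u.length : Int)) && !(p.1 == (idxOf c ((u.length : Int) + 1) v).getLastD 0))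
        = (PySem.List.enumerate v ((u.length : Int) + 1)).filter
          (fun p => !(p.1 == (idxOf c ((u.length : Int) + 1) v).getLastD 0)) := by
      apply List.filter_congr
      intro p hp
      obtain ⟨k, hk, rfl⟩ := (PySem.List.mem_enumerate_iff v ((u.length : Int) + 1) p).mp hp
      have : (!(((u.length : Int) + 1 + (k : Int), v[k]).1 == (u.length : Int))) = true := by
        simp only [Bool.not_eq_eq_eq_not, Bool.not_true, beq_eq_false_iff_ne, ne_eq]
        omega
      rw [this, Bool.true_and]
    rw [hcong, filter_last c v ((u.length : Int) + 1) hcv]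
  · have hnil : idxOf c ((u.length : Int) + 1) v = [] := idxOf_nil_of_not_mem c v _ hcv
    rw [hnil, dropLastOcc_not_mem c v hcv]
    have hself : (PySem.List.enumerate v ((u.length : Int) + 1)).filter
        (fun p => !(p.1 == (u.length : Int)) && !(p.1 == ((u.length : Int) :: ([] : List Int)).getLastD 0))
        = PySem.List.enumerate v ((u.length : Int) + 1) := by
      apply List.filter_eq_self.mpr
      intro p hp
      obtain ⟨k, hk, rfl⟩ := (PySem.List.mem_enumerate_iff v ((u.length : Int) + 1) p).mp hp
      simp only [List.getLastD_cons, List.getLastD_nil, Bool.and_eq_true, Bool.not_eq_eq_eq_not,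
        Bool.not_true, beq_eq_false_iff_ne, ne_eq]
      constructor
      · omega
      · omega
    rw [hself, PySem.List.map_snd_enumerate]

theorem remove_first_last_spec : Claim_equal_remove_first_last := by
  intro string ch _
  unfold Spec_remove_first_last remove_first_last remove_first_last_alt
  by_cases hm : ∃ a ∈ string.toList, (String.ofList [a] == ch) = true
  · obtain ⟨c, hcl, hqc⟩ := hm
    have hch : ch = String.ofList [c] := (beq_iff_eq.mp hqc).symm
    subst hch
    have hfun : (fun (p : Int × Char) => String.ofList [p.2] == String.ofList [c])
        = (fun (p : Int × Char) => p.2 == c) := funext fun p => str_beq_singleton p.2 c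
    have hstr : String.ofList string.toList = string := by simp
    simp only [hfun]
    have hidx : ((PySem.List.enumerate string.toList 0).filter
        (fun (p : Int × Char) => p.2 == c)).map Prod.fst = idxOf c 0 string.toList := rfl
    rw [hidx]
    have hne : idxOf c 0 string.toList ≠ [] := idxOf_ne_nil c string.toList 0 hcl
    rw [if_neg (by simpa [List.isEmpty_iff] using hne)]
    have := main_lists c string.toList hcl
    rw [← hstr]
    simp only [String.toList_ofList]
    rw [this]
  · have hall : ∀ a ∈ string.toList, (String.ofList [a] == ch) = false := by
      intro a ha
      have := fun h => hm ⟨a, ha, h⟩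
      simpa using this
    have hfilter : (PySem.List.enumerate string.toList 0).filter
        (fun p => String.ofList [p.2] == ch) = [] := by
      apply List.filter_eq_nil_iff.mpr
      intro p hp
      obtain ⟨k, hk, rfl⟩ := (PySem.List.mem_enumerate_iff string.toList 0 p).mp hp
      simp [hall _ (List.getElem_mem hk)]
    rw [foldl_aStep, aRun_no_match _ _ _ _ hall, hfilter]
    simp
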